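-- pv_equiv track=rewrite | github.com/juanmarosado111-bit/Python | Examen_funciones/Examen A/1.py | ejercicio1
-- ===== SOURCE A (Python) =====
-- def ejercicio1(num1,num2):
--     pares=""
--     inicio=max(num1, num2)
--     fin=min(num1,num2)
--
--     for i in range(inicio, fin-1, -1):
--         if i%2==0:
--             if pares!="":
--                 pares+=", "
--             pares+=str(i)
--     return pares
-- ===== SOURCE B (Python) =====
-- def ejercicio1(num1, num2):
--     inicio = max(num1, num2)
--     fin = min(num1, num2)
--     start = inicio - inicio % 2
--     return ", ".join(str(i) for i in range(start, fin - 1, -2))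
-- ===== Notes on version B (the rewrite author's own statement) =====
-- stated objective: idiomatic
-- what changed: Instead of scanning every integer descending by 1 and filtering with i%2 while hand-concatenating into a string, B computes the largest even number <= max and iterates with step -2 over evens only, joining str(i) with ', '.join.
import Mathlib
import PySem

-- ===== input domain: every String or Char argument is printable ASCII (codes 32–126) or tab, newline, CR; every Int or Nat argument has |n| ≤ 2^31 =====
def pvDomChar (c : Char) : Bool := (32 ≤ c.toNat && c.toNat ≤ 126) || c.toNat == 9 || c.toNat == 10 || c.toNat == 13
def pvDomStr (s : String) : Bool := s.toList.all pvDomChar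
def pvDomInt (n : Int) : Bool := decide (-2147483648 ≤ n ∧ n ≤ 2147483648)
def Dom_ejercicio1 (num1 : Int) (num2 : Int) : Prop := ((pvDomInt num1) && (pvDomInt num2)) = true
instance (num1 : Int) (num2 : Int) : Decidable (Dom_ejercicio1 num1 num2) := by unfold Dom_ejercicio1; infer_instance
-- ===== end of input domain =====

-- B replaces A's step -1 scan with a parity filter by a step -2 loop over even numbers only,
-- joined with ', '.join — an idiomatic rewrite; return value only, no side effects involved.

-- ===== PORT A =====
def ejercicio1 (num1 : Int) (num2 : Int) : String :=
  let pares := ""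
  let inicio := max num1 num2
  let fin := min num1 num2
  (PySem.List.pyRange inicio (fin - 1) (-1)).foldl
    (fun pares i =>
      if PySem.Int.mod i 2 = 0 then
        (if pares ≠ "" then pares ++ ", " else pares) ++ PySem.Int.toStr i
      else pares) pares

-- ===== PORT B =====
def ejercicio1_alt (num1 : Int) (num2 : Int) : String :=
  let inicio := max num1 num2
  let fin := min num1 num2
  let start := inicio - PySem.Int.mod inicio 2
  PySem.Str.join ", " ((PySem.List.pyRange start (fin - 1) (-2)).map PySem.Int.toStr)

-- ===== PRECONDITION & SPEC =====
def Spec_ejercicio1 (num1 : Int) (num2 : Int) (out : String) : Prop := out = ejercicio1_alt num1 num2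
instance (num1 : Int) (num2 : Int) (out : String) : Decidable (Spec_ejercicio1 num1 num2 out) := by unfold Spec_ejercicio1; infer_instance

-- ===== CLAIM (what is proved, stated in full; the proofs are below) =====
def Claim_equal_ejercicio1 : Prop := ∀ (num1 : Int) (num2 : Int), Dom_ejercicio1 num1 num2 → Spec_ejercicio1 num1 num2 (ejercicio1 num1 num2)

-- ===== LEMMAS AND PROOFS =====

-- the accumulator step of A's loop, named for the proofs
def pvStep (pares : String) (i : Int) : String :=
  (if pares ≠ "" then pares ++ ", " else pares) ++ PySem.Int.toStr i

theorem pv_tdc_len : ∀ (f n : Nat) (acc : List Char),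
    (Nat.toDigitsCore 10 (f+1) n acc).length ≥ acc.length + 1 := by
  intro f
  induction f with
  | zero => intro n acc; simp [Nat.toDigitsCore]
  | succ f ih =>
    intro n acc
    rw [Nat.toDigitsCore]
    split
    · simp
    · have := ih (n/10) (Nat.digitChar (n % 10) :: acc)
      simp only [List.length_cons] at this
      omega

theorem pv_toDigits_ne_nil (n : Nat) : Nat.toDigits 10 n ≠ [] := by
  have := pv_tdc_len n n []
  intro h; unfold Nat.toDigits at h; rw [h] at this; simp at this

theorem pv_toStr_ne_empty (n : Int) : PySem.Int.toStr n ≠ "" := by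
  intro h
  rw [← String.toList_inj] at h
  simp only [PySem.Int.toStr, String.toList_ofList] at h
  unfold PySem.Int.toChars at h
  split at h
  · simp at h
  · exact pv_toDigits_ne_nil _ (by simpa using h)

theorem pv_append_ne_empty (s t : String) (ht : t ≠ "") : s ++ t ≠ "" := by
  intro h
  rw [← String.toList_inj] at h
  simp [String.toList_append] at h
  exact ht h.2

theorem pv_join_cons_cons (s t : String) (r : List String) :
    PySem.Str.join ", " (s :: t :: r) = s ++ ", " ++ PySem.Str.join ", " (t :: r) := by
  rw [← String.toList_inj]
  simp [PySem.Str.toList_join, PySem.Chars.join_cons_cons, String.toList_append]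

theorem pv_join_singleton (s : String) : PySem.Str.join ", " [s] = s := by
  rw [← String.toList_inj]
  simp [PySem.Str.toList_join, PySem.Chars.join_singleton]

theorem pv_join_absorb (s t : String) (r : List String) :
    PySem.Str.join ", " ((s ++ ", " ++ t) :: r) = s ++ ", " ++ PySem.Str.join ", " (t :: r) := by
  cases r with
  | nil => rw [pv_join_singleton, pv_join_singleton]
  | cons x xs =>
    rw [pv_join_cons_cons, pv_join_cons_cons]
    simp [String.append_assoc]

theorem pv_foldl_join : ∀ (l : List Int) (s : String), s ≠ "" →
    l.foldl pvStep s = PySem.Str.join ", " (s :: l.map PySem.Int.toStr) := by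
  intro l
  induction l with
  | nil => intro s _; simp [pv_join_singleton]
  | cons i l ih =>
    intro s hs
    have hstep : pvStep s i = s ++ ", " ++ PySem.Int.toStr i := by
      simp [pvStep, hs, String.append_assoc]
    have hne : s ++ ", " ++ PySem.Int.toStr i ≠ "" :=
      pv_append_ne_empty _ _ (pv_toStr_ne_empty i)
    calc (i :: l).foldl pvStep s = l.foldl pvStep (s ++ ", " ++ PySem.Int.toStr i) := by
          simp [List.foldl_cons, hstep]
      _ = PySem.Str.join ", " ((s ++ ", " ++ PySem.Int.toStr i) :: l.map PySem.Int.toStr) := ih _ hne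
      _ = s ++ ", " ++ PySem.Str.join ", " (PySem.Int.toStr i :: l.map PySem.Int.toStr) := pv_join_absorb _ _ _
      _ = PySem.Str.join ", " (s :: PySem.Int.toStr i :: l.map PySem.Int.toStr) := (pv_join_cons_cons _ _ _).symm

theorem pv_fmod_two (a : Int) : PySem.Int.mod a 2 = a % 2 := by
  simp [PySem.Int.mod, Int.fmod_eq_emod]

theorem pv_range2_nil {a b : Int} (h : a ≤ b) : PySem.List.pyRange a b (-2) = [] := by
  simp [PySem.List.pyRange]
  omega

theorem pv_range2_cons {a b : Int} (h : b < a) :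
    PySem.List.pyRange a b (-2) = a :: PySem.List.pyRange (a - 2) b (-2) := by
  simp only [PySem.List.pyRange]
  norm_num
  rw [if_pos h]
  have hn : ((a - b + 2 - 1) / 2).toNat = ((a - b + 2 - 1) / 2).toNat - 1 + 1 := by omega
  rw [hn, List.range_succ_eq_map, List.map_cons, List.map_map]
  congr 1
  · norm_num
  · by_cases h2 : b < a - 2
    · rw [if_pos h2]
      have hc : ((a - 2 - b + 2 - 1) / 2).toNat = ((a - b + 2 - 1) / 2).toNat - 1 := by omega
      rw [hc]
      apply List.map_congr_left
      intro k _
      simp [Function.comp]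
      ring
    · rw [if_neg h2]
      have hc : ((a - b + 2 - 1) / 2).toNat - 1 = 0 := by omega
      simp [hc]

theorem pv_filter_even : ∀ (n : Nat) (a b : Int), (a - b).toNat ≤ n →
    (PySem.List.pyRange a b (-1)).filter (fun i => decide (PySem.Int.mod i 2 = 0))
      = PySem.List.pyRange (a - PySem.Int.mod a 2) b (-2) := by
  intro n
  induction n with
  | zero =>
    intro a b h
    have hab : a ≤ b := by omega
    rw [PySem.List.pyRange_neg_one_eq_nil hab, pv_range2_nil (by rw [pv_fmod_two]; omega)]
    rfl
  | succ n ih =>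
    intro a b h
    by_cases hab : a ≤ b
    · rw [PySem.List.pyRange_neg_one_eq_nil hab, pv_range2_nil (by rw [pv_fmod_two]; omega)]
      rfl
    · have hba : b < a := by omega
      rw [PySem.List.pyRange_neg_one_cons hba, List.filter_cons]
      by_cases he : a % 2 = 0
      · rw [if_pos (show decide (PySem.Int.mod a 2 = 0) = true by simp only [decide_eq_true_eq, pv_fmod_two]; exact he)]
        rw [ih (a - 1) b (by omega)]
        simp only [pv_fmod_two]
        rw [show (a - 1) % 2 = 1 from by omega, he]
        rw [show a - 1 - 1 = a - 2 from by ring, show a - (0:Int) = a from by ring]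
        rw [pv_range2_cons hba]
      · rw [if_neg (show ¬ decide (PySem.Int.mod a 2 = 0) = true by simp only [decide_eq_true_eq, pv_fmod_two]; exact he)]
        rw [ih (a - 1) b (by omega)]
        simp only [pv_fmod_two]
        rw [show (a - 1) % 2 = 0 from by omega, show a % 2 = 1 from by omega]
        rw [show a - 1 - 0 = a - 1 from by ring]

theorem pv_foldl_if (l : List Int) (init : String) :
    l.foldl (fun pares i =>
        if PySem.Int.mod i 2 = 0 then
          (if pares ≠ "" then pares ++ ", " else pares) ++ PySem.Int.toStr i
        else pares) init
      = (l.filter (fun i => decide (PySem.Int.mod i 2 = 0))).foldl pvStep init := by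
  induction l generalizing init with
  | nil => rfl
  | cons i l ih =>
    simp only [List.foldl_cons, List.filter_cons]
    by_cases h : PySem.Int.mod i 2 = 0
    · rw [if_pos h, if_pos (show decide (PySem.Int.mod i 2 = 0) = true by simp only [decide_eq_true_eq]; exact h), List.foldl_cons]
      exact ih _
    · rw [if_neg h, if_neg (show ¬ decide (PySem.Int.mod i 2 = 0) = true by simp only [decide_eq_true_eq]; exact h)]
      exact ih _

theorem pv_join_nil : PySem.Str.join ", " ([] : List String) = "" := by
  rw [← String.toList_inj]
  simp [PySem.Str.toList_join, PySem.Chars.join, List.intercalate]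

-- ===== VERDICT (by name: the statement is the Claim_ definition above) =====
theorem ejercicio1_spec : Claim_equal_ejercicio1 := by
  intro num1 num2 _
  unfold Spec_ejercicio1 ejercicio1 ejercicio1_alt
  simp only []
  rw [pv_foldl_if, pv_filter_even (max num1 num2 - (min num1 num2 - 1)).toNat _ _ (le_refl _)]
  cases hE : PySem.List.pyRange (max num1 num2 - PySem.Int.mod (max num1 num2) 2) (min num1 num2 - 1) (-2) with
  | nil => simp [pv_join_nil]
  | cons e rest =>
    simp only [List.foldl_cons, List.map_cons]
    have h0 : pvStep "" e = PySem.Int.toStr e := by simp [pvStep]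
    rw [h0]
    exact pv_foldl_join rest (PySem.Int.toStr e) (pv_toStr_ne_empty e)
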